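-- pv_equiv track=rewrite | github.com/SINHOLEE/Algorithm | python/beckjun/1072_게임.py | solution
-- ===== SOURCE A (Python) =====
-- def solution(x,y):
--     target = ((y*100)//x)
--     s = y
--     e = 2000000000
--     answer = -1
--     while s<=e:
--         m = (s+e)//2
--         if target < (((m)*100) //(x+m-y)):
--             answer=m-y
--             e = m-1
--         else:
--             s = m+1
--     return answer
-- ===== SOURCE B (Python) =====
-- def solution(x, y):
--     z = (y * 100) // x
--     if z >= 99:
--         return -1
--     k = -(-((z + 1) * x - 100 * y) // (99 - z))
--     return k if y + k <= 2000000000 else -1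
-- ===== Notes on version B (the rewrite author's own statement) =====
-- stated objective: faster
-- what changed: Replaces A's binary search over m in [y, 2e9] by a closed-form ceiling-division formula for the minimal extra games k derived from the inequality (z+1)*(x+k) <= 100*(y+k), keeping A's 2e9 cut-off.
-- outside the precondition, e.g. on solution(-1432068142, 864329799): A returns -1, B returns -3180571; on solution(0, 3): A raises ZeroDivisionError, B raises ZeroDivisionError
import Mathlib
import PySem

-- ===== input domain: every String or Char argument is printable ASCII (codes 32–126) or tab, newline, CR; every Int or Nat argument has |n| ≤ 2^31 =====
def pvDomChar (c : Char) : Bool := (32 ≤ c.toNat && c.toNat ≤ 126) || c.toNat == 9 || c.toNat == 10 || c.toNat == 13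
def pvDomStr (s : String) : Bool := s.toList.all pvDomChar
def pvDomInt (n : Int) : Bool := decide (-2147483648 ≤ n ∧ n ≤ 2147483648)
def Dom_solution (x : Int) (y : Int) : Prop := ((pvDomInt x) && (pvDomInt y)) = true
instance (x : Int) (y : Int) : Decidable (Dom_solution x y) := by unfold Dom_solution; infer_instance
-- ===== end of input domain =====

-- B replaces A's binary search by a closed-form ceiling-division formula (same return value on Pre_).

-- ===== PORT A =====
-- the while-loop of A, state (s, e, answer)
def solutionLoop (x : Int) (y : Int) (target : Int) (s : Int) (e : Int) (answer : Int) : Int :=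
  if h : s ≤ e then
    let m := PySem.Int.floordiv (s + e) 2
    if target < PySem.Int.floordiv (m * 100) (x + m - y) then
      solutionLoop x y target s (m - 1) (m - y)
    else
      solutionLoop x y target (m + 1) e answer
  else answer
termination_by (e + 1 - s).toNat
decreasing_by
  · have hb := PySem.Int.floordiv_two_mid_bounds h
    omega
  · have hb := PySem.Int.floordiv_two_mid_bounds h
    omega

def solution (x : Int) (y : Int) : Int :=
  solutionLoop x y (PySem.Int.floordiv (y * 100) x) y 2000000000 (-1)

-- ===== PORT B =====
def solution_alt (x : Int) (y : Int) : Int :=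
  let z := PySem.Int.floordiv (y * 100) x
  if 99 ≤ z then -1
  else
    let k := -(PySem.Int.floordiv (-((z + 1) * x - 100 * y)) (99 - z))
    if y + k ≤ 2000000000 then k else -1

-- ===== PRECONDITION & SPEC =====
-- Pre_ restricts to the problem's natural domain of a positive total game count x:
-- x = 0 makes A raise ZeroDivisionError, and for x < 0 A's binary-search predicate is
-- non-monotone, so A either hits a zero divisor (ZeroDivisionError) or returns an
-- accidental value of the probe order that no specification would pick.
def Pre_solution (x : Int) (y : Int) : Prop := 0 < x
instance (x : Int) (y : Int) : Decidable (Pre_solution x y) := by unfold Pre_solution; infer_instance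
def pvWitness_solution : Int × Int := (2, 1)

def Spec_solution (x : Int) (y : Int) (out : Int) : Prop := out = solution_alt x y
instance (x : Int) (y : Int) (out : Int) : Decidable (Spec_solution x y out) := by unfold Spec_solution; infer_instance

-- ===== CLAIM (what is proved, stated in full; the proofs are below) =====
def Claim_equal_solution : Prop := ∀ (x : Int) (y : Int), Dom_solution x y → Pre_solution x y → Spec_solution x y (solution x y)

-- ===== LEMMAS AND PROOFS =====

-- the search predicate, characterized algebraically: for m ≥ y (so the divisor is x + (m-y) ≥ x > 0),
-- target < (m*100) // (x+m-y)  ↔  (z+1)*x - 100*y ≤ (99-z)*(m-y)  where z = (y*100)//x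
theorem pv_Pchar (x y m : Int) (hx : 0 < x) (hm : y ≤ m) :
    (PySem.Int.floordiv (y * 100) x < PySem.Int.floordiv (m * 100) (x + m - y)
      ↔ (PySem.Int.floordiv (y * 100) x + 1) * x - 100 * y
          ≤ (99 - PySem.Int.floordiv (y * 100) x) * (m - y)) := by
  set z := PySem.Int.floordiv (y * 100) x with hz
  have hd : (0 : Int) < x + m - y := by omega
  have h1 : z < PySem.Int.floordiv (m * 100) (x + m - y)
      ↔ (z + 1) * (x + m - y) ≤ m * 100 := by
    constructor
    · intro h
      have := (PySem.Int.le_floordiv_iff_mul_le hd (q := z + 1) (a := m * 100)).1 (by omega)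
      linarith
    · intro h
      have := (PySem.Int.le_floordiv_iff_mul_le hd (q := z + 1) (a := m * 100)).2 h
      omega
  rw [h1]
  constructor <;> intro h <;> nlinarith [h]

-- the closed-form k: for d0 = 99 - z > 0 and R, k0 = ceil(R / d0) satisfies k0 ≤ k ↔ R ≤ d0 * k
theorem pv_kchar (R d0 k : Int) (hd0 : 0 < d0) :
    (-(PySem.Int.floordiv (-R) d0) ≤ k ↔ R ≤ d0 * k) := by
  constructor
  · intro h
    have := (PySem.Int.le_floordiv_iff_mul_le hd0 (q := -k) (a := -R)).1 (by omega)
    nlinarith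
  · intro h
    have := (PySem.Int.le_floordiv_iff_mul_le hd0 (q := -k) (a := -R)).2 (by nlinarith)
    omega

-- R = (z+1)*x - 100*y ≥ 1, from the floor property of z = (y*100)//x
theorem pv_R_pos (x y : Int) (hx : 0 < x) :
    1 ≤ (PySem.Int.floordiv (y * 100) x + 1) * x - 100 * y := by
  have := (PySem.Int.floordiv_lt_iff_lt_mul hx (a := y * 100)
    (q := PySem.Int.floordiv (y * 100) x + 1)).1 (by omega)
  nlinarith

-- the loop invariant: all m in [y, s) fail the predicate; answer records the best found so far
theorem pv_loop_eq (x y : Int) (hx : 0 < x) :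
    ∀ (n : Nat) (s e answer : Int), (e + 1 - s).toNat = n →
    y ≤ s → s ≤ e + 1 → e ≤ 2000000000 →
    (∀ m, y ≤ m → m < s →
      ¬ (PySem.Int.floordiv (y * 100) x < PySem.Int.floordiv (m * 100) (x + m - y))) →
    ((answer = -1 ∧ e = 2000000000) ∨
      (answer = e + 1 - y ∧ e < 2000000000 ∧
        PySem.Int.floordiv (y * 100) x < PySem.Int.floordiv ((e + 1) * 100) (x + (e + 1) - y))) →
    solutionLoop x y (PySem.Int.floordiv (y * 100) x) s e answer = solution_alt x y := by
  intro n
  induction n using Nat.strong_induction_on with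
  | _ n ih =>
    intro s e answer hn hys hse heE hfail hinv
    set z := PySem.Int.floordiv (y * 100) x with hz
    have hR := pv_R_pos x y hx
    rw [solutionLoop]
    by_cases h : s ≤ e
    · simp only [h, dif_pos]
      have hb := PySem.Int.floordiv_two_mid_bounds h
      set m := PySem.Int.floordiv (s + e) 2 with hmdef
      by_cases hp : z < PySem.Int.floordiv (m * 100) (x + m - y)
      · simp only [hp, if_pos]
        exact ih (m - s).toNat (by omega) s (m - 1) (m - y) (by omega) hys (by omega)
          (by omega) hfail
          (Or.inr ⟨by ring, by omega, by simpa using hp⟩)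
      · simp only [hp, if_neg, not_false_iff]
        refine ih (e - m).toNat (by omega) (m + 1) e answer (by omega) (by omega) (by omega)
          heE ?_ hinv
        intro m' hym' hm'
        by_cases hcase : m' < s
        · exact hfail m' hym' hcase
        · -- s ≤ m' ≤ m : use monotonicity of the algebraic characterization
          intro hpm'
          apply hp
          rw [pv_Pchar x y m hx (by omega)]
          rw [pv_Pchar x y m' hx hym'] at hpm'
          by_cases hz99 : 99 ≤ z
          · nlinarith
          · nlinarith
    · simp only [h, dif_neg, not_false_iff]
      -- termination: s = e + 1 (from s ≤ e + 1 and ¬ s ≤ e)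
      rcases hinv with ⟨ha, he⟩ | ⟨ha, heE', hpe⟩
      · -- nothing found: every m in [y, 2000000000] fails; alt must also give -1
        unfold solution_alt
        rw [← hz]
        by_cases hz99 : 99 ≤ z
        · simp [hz99, ha]
        · simp only [hz99, if_neg, not_false_iff]
          set k0 := -(PySem.Int.floordiv (-((z + 1) * x - 100 * y)) (99 - z)) with hk0
          have hchar := pv_kchar ((z + 1) * x - 100 * y) (99 - z) k0 (by omega)
          have hRk0 : (z + 1) * x - 100 * y ≤ (99 - z) * k0 := hchar.1 le_rfl
          have hk0pos : 1 ≤ k0 := by nlinarith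
          have hout : ¬ (y + k0 ≤ 2000000000) := by
            intro hle
            have := hfail (y + k0) (by omega) (by omega)
            apply this
            rw [pv_Pchar x y (y + k0) hx (by omega)]
            simpa using hRk0
          simp [hout, ha]
      · -- found: answer = e + 1 - y is the minimal solution, and it equals the closed form
        rw [pv_Pchar x y (e + 1) hx (by omega)] at hpe
        have hz99 : ¬ (99 ≤ z) := by
          intro hz99
          nlinarith
        unfold solution_alt
        rw [← hz]
        simp only [hz99, if_neg, not_false_iff]
        set k0 := -(PySem.Int.floordiv (-((z + 1) * x - 100 * y)) (99 - z)) with hk0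
        have hchar := pv_kchar ((z + 1) * x - 100 * y) (99 - z) k0 (by omega)
        have hRk0 : (z + 1) * x - 100 * y ≤ (99 - z) * k0 := hchar.1 le_rfl
        have hk0pos : 1 ≤ k0 := by nlinarith
        have hle : k0 ≤ e + 1 - y :=
          (pv_kchar ((z + 1) * x - 100 * y) (99 - z) (e + 1 - y) (by omega)).2 (by linarith)
        have hge : e + 1 - y ≤ k0 := by
          by_contra hlt
          have := hfail (y + k0) (by omega) (by omega)
          apply this
          rw [pv_Pchar x y (y + k0) hx (by omega)]
          simpa using hRk0
        have hcond : y + k0 ≤ 2000000000 := by omega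
        simp only [hcond, if_pos]
        omega

-- ===== VERDICT (by name: the statement is the Claim_ definition above) =====
theorem solution_spec : Claim_equal_solution := by
  intro x y hdom hpre
  unfold Spec_solution solution
  have hx : (0 : Int) < x := hpre
  by_cases hy : y ≤ 2000000000
  · exact pv_loop_eq x y hx (2000000001 - y).toNat y 2000000000 (-1) (by omega) le_rfl
      (by omega) le_rfl (by omega) (Or.inl ⟨rfl, rfl⟩)
  · -- y > 2000000000: the loop never runs; the closed form also exceeds the cut-off
    rw [solutionLoop]
    simp only [show ¬ (y ≤ (2000000000 : Int)) from hy, dif_neg, not_false_iff]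
    set z := PySem.Int.floordiv (y * 100) x with hz
    unfold solution_alt
    rw [← hz]
    by_cases hz99 : 99 ≤ z
    · simp [hz99]
    · simp only [hz99, if_neg, not_false_iff]
      set k0 := -(PySem.Int.floordiv (-((z + 1) * x - 100 * y)) (99 - z)) with hk0
      have hR := pv_R_pos x y hx
      have hRk0 : (z + 1) * x - 100 * y ≤ (99 - z) * k0 :=
        (pv_kchar ((z + 1) * x - 100 * y) (99 - z) k0 (by omega)).1 le_rfl
      have hk0pos : 1 ≤ k0 := by nlinarith
      simp [show ¬ (y + k0 ≤ 2000000000) by omega]
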